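-- pv_equiv track=rewrite | github.com/gregdferrell/algo | problems/avoid_spike.py | can_stop_first_pass
-- ===== SOURCE A (Python) =====
-- def can_stop_first_pass(runway, speed, pos=0):
-- 	if not (0 <= pos < len(runway)) or not runway[pos]:
-- 		return False
--
-- 	if speed == 0 and (0 <= pos < len(runway)) and runway[pos]:
-- 		return True
--
-- 	return any((can_stop_first_pass(runway, speed - 1, pos + speed - 1),
-- 				can_stop_first_pass(runway, speed, pos + speed),
-- 				can_stop_first_pass(runway, speed + 1, pos + speed + 1)))
-- ===== SOURCE B (Python) =====
-- def can_stop_first_pass(runway, speed, pos=0):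
--     # Breadth-first search over reachable (position, speed) states with a
--     # visited set, instead of A's exponential 3-way recursion.
--     n = len(runway)
--     if not (0 <= pos < n and runway[pos]):
--         return False
--     seen = {(pos, speed)}
--     frontier = [(pos, speed)]
--     while frontier:
--         if any(s == 0 for (p, s) in frontier):
--             return True
--         nxt = []
--         for (p, s) in frontier:
--             for ns in (s - 1, s, s + 1):
--                 q = p + ns
--                 if 0 <= q < n and runway[q] and (q, ns) not in seen:
--                     seen.add((q, ns))
--                     nxt.append((q, ns))
--         frontier = nxt
--     return False
-- ===== Notes on version B (the rewrite author's own statement) =====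
-- stated objective: faster
-- what changed: Replaced the exponential 3-way recursive search by a breadth-first search over reachable (position, speed) states with a visited set, so each state is expanded at most once.
import Mathlib
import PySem

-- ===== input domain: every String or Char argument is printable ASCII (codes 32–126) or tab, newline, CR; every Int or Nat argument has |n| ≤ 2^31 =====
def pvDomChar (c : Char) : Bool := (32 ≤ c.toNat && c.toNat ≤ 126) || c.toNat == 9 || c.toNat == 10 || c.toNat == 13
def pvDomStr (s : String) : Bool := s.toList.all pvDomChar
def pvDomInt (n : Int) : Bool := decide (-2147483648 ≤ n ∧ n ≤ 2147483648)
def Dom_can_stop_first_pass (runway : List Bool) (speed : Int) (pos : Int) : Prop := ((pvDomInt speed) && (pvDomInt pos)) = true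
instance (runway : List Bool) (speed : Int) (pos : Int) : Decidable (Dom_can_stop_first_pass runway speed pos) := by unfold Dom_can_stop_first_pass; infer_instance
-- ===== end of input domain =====

-- B replaces A's exponential 3-way recursion by a worklist fixpoint over the finite
-- reachable (position, speed) state graph (objective: faster).

-- ===== PORT A =====
-- Termination measure for A's recursion: positive speeds push pos up and out of the
-- runway, negative speeds push it down and out; speed 0 stops immediately.
def pvMeasure (runway : List Bool) (speed : Int) (pos : Int) : Nat :=
  if speed = 0 then 0
  else if 0 < speed then 1 + 2 * ((runway.length : Int) - pos).toNat
  else 1 + 2 * (pos + 1).toNat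

def can_stop_first_pass (runway : List Bool) (speed : Int) (pos : Int) : Bool :=
  if h : ¬(0 ≤ pos ∧ pos < PySem.List.len runway ∧ PySem.List.pyGetD runway pos false = true) then
    false
  else if h2 : speed = 0 ∧ 0 ≤ pos ∧ pos < PySem.List.len runway ∧ PySem.List.pyGetD runway pos false = true then
    true
  else
    (can_stop_first_pass runway (speed - 1) (pos + speed - 1) ||
     can_stop_first_pass runway speed (pos + speed) ||
     can_stop_first_pass runway (speed + 1) (pos + speed + 1))
termination_by pvMeasure runway speed pos
decreasing_by
  all_goals
    (rw [not_not] at h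
     have hs : speed ≠ 0 := fun h0 => h2 ⟨h0, h⟩
     simp only [PySem.List.len_eq] at h
     simp only [pvMeasure]
     split_ifs <;> omega)

-- ===== PORT B =====
-- '0 <= q < n and runway[q]'
def pvValidB (runway : List Bool) (q : Int) : Bool :=
  decide (0 ≤ q) && decide (q < PySem.List.len runway) && PySem.List.pyGetD runway q false

-- body of Source B's inner 'for ns in (s - 1, s, s + 1)' loop
def pvPush (runway : List Bool) (st : Int × Int)
    (acc : PySem.Set (Int × Int) × List (Int × Int)) (ns : Int) :
    PySem.Set (Int × Int) × List (Int × Int) :=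
  if pvValidB runway (st.1 + ns) && !(acc.1.contains (st.1 + ns, ns)) then
    (PySem.Set.add acc.1 (st.1 + ns, ns), acc.2 ++ [(st.1 + ns, ns)])
  else acc

-- body of Source B's outer 'for (p, s) in frontier' loop
def pvOuter (runway : List Bool) (acc : PySem.Set (Int × Int) × List (Int × Int))
    (st : Int × Int) : PySem.Set (Int × Int) × List (Int × Int) :=
  [st.2 - 1, st.2, st.2 + 1].foldl (pvPush runway st) acc

-- one round of Source B's while loop: expand the whole frontier, returning (seen, nxt)
def pvExpand (runway : List Bool) (frontier : List (Int × Int))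
    (seen : PySem.Set (Int × Int)) : PySem.Set (Int × Int) × List (Int × Int) :=
  frontier.foldl (pvOuter runway) (seen, [])

-- ghost universe used only to bound the visited set for termination
def pvAllStates (runway : List Bool) : List (Int × Int) :=
  (PySem.List.pyRange 0 (PySem.List.len runway) 1).flatMap
    (fun p => (PySem.List.pyRange (-(PySem.List.len runway)) (PySem.List.len runway + 1) 1).map
      (fun s => (p, s)))

-- a runway position is valid: in range and spike-free (Prop form)
def pvValidP (runway : List Bool) (pos : Int) : Prop :=
  0 ≤ pos ∧ pos < PySem.List.len runway ∧ PySem.List.pyGetD runway pos false = true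

-- loop invariant carried through pvLoop purely for termination (U is ghost data)
def pvInv (runway : List Bool) (U frontier : List (Int × Int))
    (seen : PySem.Set (Int × Int)) : Prop :=
  (∀ st : Int × Int, pvValidP runway st.1 →
      -PySem.List.len runway ≤ st.2 → st.2 ≤ PySem.List.len runway → st ∈ U) ∧
  List.Nodup seen ∧ (∀ x ∈ seen, x ∈ U) ∧
  (∀ st ∈ frontier, pvValidP runway st.1) ∧ (∀ st ∈ frontier, st ∈ seen)

lemma pvValidB_iff (runway : List Bool) (q : Int) :
    pvValidB runway q = true ↔ pvValidP runway q := by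
  simp [pvValidB, pvValidP, and_assoc]

-- combined description of pvPush (proved before pvLoop, which needs the expand facts)
lemma pvPush_master (runway : List Bool) (st : Int × Int)
    (acc : PySem.Set (Int × Int) × List (Int × Int)) (ns : Int) :
    ∃ l, (pvPush runway st acc ns).1 = acc.1 ++ l ∧
      (pvPush runway st acc ns).2 = acc.2 ++ l ∧
      (∀ x ∈ l, x = (st.1 + ns, ns) ∧ pvValidB runway (st.1 + ns) = true) ∧
      (acc.1.Nodup → (acc.1 ++ l).Nodup) ∧
      (pvValidB runway (st.1 + ns) = true → (st.1 + ns, ns) ∈ acc.1 ++ l) := by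
  unfold pvPush
  by_cases hc : (pvValidB runway (st.1 + ns) && !(acc.1.contains (st.1 + ns, ns))) = true
  · rw [if_pos hc]
    simp only [Bool.and_eq_true, Bool.not_eq_true'] at hc
    have hnm : (st.1 + ns, ns) ∉ acc.1 := by
      simpa [List.contains_eq_mem] using hc.2
    refine ⟨[(st.1 + ns, ns)], ?_, rfl, ?_, ?_, ?_⟩
    · exact PySem.Set.add_of_not_mem hnm
    · intro x hx
      simp at hx
      exact ⟨hx, hc.1⟩
    · intro hnd
      simp [List.nodup_append, hnd]
      intro a b hab ha hb
      subst ha; subst hb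
      exact hnm hab
    · simp
  · rw [if_neg hc]
    refine ⟨[], by simp, by simp, by simp, by simp, ?_⟩
    intro hvb
    simp only [Bool.and_eq_true, Bool.not_eq_true'] at hc
    rcases (not_and_or.mp hc) with h | h
    · exact absurd hvb h
    · have hct : acc.1.contains (st.1 + ns, ns) = true := by
        revert h; cases acc.1.contains (st.1 + ns, ns) <;> simp
      simpa [List.contains_eq_mem] using hct

-- three children of one frontier state
lemma pvInner_master (runway : List Bool) (st : Int × Int)
    (acc : PySem.Set (Int × Int) × List (Int × Int)) :
    ∃ l, (pvOuter runway acc st).1 = acc.1 ++ l ∧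
      (pvOuter runway acc st).2 = acc.2 ++ l ∧
      (∀ x ∈ l, ∃ ns, (ns = st.2 - 1 ∨ ns = st.2 ∨ ns = st.2 + 1) ∧
        x = (st.1 + ns, ns) ∧ pvValidB runway (st.1 + ns) = true) ∧
      (acc.1.Nodup → (acc.1 ++ l).Nodup) ∧
      (∀ ns, (ns = st.2 - 1 ∨ ns = st.2 ∨ ns = st.2 + 1) →
        pvValidB runway (st.1 + ns) = true →
        (st.1 + ns, ns) ∈ acc.1 ++ l) := by
  obtain ⟨l1, e11, e12, e13, e14, e15⟩ := pvPush_master runway st acc (st.2 - 1)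
  set a1 := pvPush runway st acc (st.2 - 1) with ha1
  obtain ⟨l2, e21, e22, e23, e24, e25⟩ := pvPush_master runway st a1 st.2
  set a2 := pvPush runway st a1 st.2 with ha2
  obtain ⟨l3, e31, e32, e33, e34, e35⟩ := pvPush_master runway st a2 (st.2 + 1)
  set a3 := pvPush runway st a2 (st.2 + 1) with ha3
  have hfold : pvOuter runway acc st = a3 := rfl
  refine ⟨l1 ++ l2 ++ l3, ?_, ?_, ?_, ?_, ?_⟩
  · rw [hfold, e31, e21, e11]; simp [List.append_assoc]
  · rw [hfold, e32, e22, e12]; simp [List.append_assoc]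
  · intro x hx
    simp only [List.mem_append] at hx
    rcases hx with (hx | hx) | hx
    · exact ⟨st.2 - 1, Or.inl rfl, (e13 x hx).1, (e13 x hx).2⟩
    · exact ⟨st.2, Or.inr (Or.inl rfl), (e23 x hx).1, (e23 x hx).2⟩
    · exact ⟨st.2 + 1, Or.inr (Or.inr rfl), (e33 x hx).1, (e33 x hx).2⟩
  · intro hnd
    have h1 : a1.1.Nodup := by rw [e11]; exact e14 hnd
    have h2 : a2.1.Nodup := by rw [e21]; exact e24 h1
    have h3 : (a2.1 ++ l3).Nodup := e34 h2
    rw [e21, e11] at h3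
    simpa [List.append_assoc] using h3
  · intro ns hns hvb
    have hfin : (st.1 + ns, ns) ∈ ((acc.1 ++ l1) ++ l2) ++ l3 := by
      rcases hns with h | h | h
      · subst h
        exact List.mem_append_left _ (List.mem_append_left _ (e15 hvb))
      · subst h
        have := e25 hvb
        rw [e11] at this
        exact List.mem_append_left _ this
      · subst h
        have := e35 hvb
        rw [e21, e11] at this
        exact this
    rw [List.append_assoc acc.1 l1 l2, List.append_assoc] at hfin
    exact hfin

-- whole-frontier expansion
lemma pvExpand_master (runway : List Bool) (f : List (Int × Int)) :
    ∀ acc : PySem.Set (Int × Int) × List (Int × Int),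
    ∃ l, (f.foldl (pvOuter runway) acc).1 = acc.1 ++ l ∧
      (f.foldl (pvOuter runway) acc).2 = acc.2 ++ l ∧
      (∀ x ∈ l, ∃ st ∈ f, ∃ ns, (ns = st.2 - 1 ∨ ns = st.2 ∨ ns = st.2 + 1) ∧
        x = (st.1 + ns, ns) ∧ pvValidB runway (st.1 + ns) = true) ∧
      (acc.1.Nodup → (acc.1 ++ l).Nodup) ∧
      (∀ st ∈ f, ∀ ns, (ns = st.2 - 1 ∨ ns = st.2 ∨ ns = st.2 + 1) →
        pvValidB runway (st.1 + ns) = true → (st.1 + ns, ns) ∈ acc.1 ++ l) := by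
  induction f with
  | nil =>
      intro acc
      exact ⟨[], by simp, by simp, by simp, by simp, by simp⟩
  | cons st f ih =>
      intro acc
      obtain ⟨l0, e1, e2, e3, e4, e5⟩ := pvInner_master runway st acc
      obtain ⟨l, f1, f2, f3, f4, f5⟩ := ih (pvOuter runway acc st)
      have hstep : (st :: f).foldl (pvOuter runway) acc = f.foldl (pvOuter runway) (pvOuter runway acc st) := rfl
      refine ⟨l0 ++ l, ?_, ?_, ?_, ?_, ?_⟩
      · rw [hstep, f1, e1, List.append_assoc]
      · rw [hstep, f2, e2, List.append_assoc]
      · intro x hx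
        rcases List.mem_append.mp hx with hx | hx
        · obtain ⟨ns, hns, hx1, hx2⟩ := e3 x hx
          exact ⟨st, List.mem_cons_self .., ns, hns, hx1, hx2⟩
        · obtain ⟨st', hst', ns, hns, hx1, hx2⟩ := f3 x hx
          exact ⟨st', List.mem_cons_of_mem _ hst', ns, hns, hx1, hx2⟩
      · intro hnd
        have h0 := f4 (by rw [e1]; exact e4 hnd)
        rw [e1, List.append_assoc] at h0
        exact h0
      · intro st' hst' ns hns hvb
        rcases List.mem_cons.mp hst' with rfl | hst'
        · have hm := e5 ns hns hvb
          rw [← e1] at hm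
          have hmono : (pvOuter runway acc st').1 ⊆ (f.foldl (pvOuter runway) (pvOuter runway acc st')).1 := by
            rw [f1]
            intro y hy
            exact List.mem_append_left _ hy
          have := hmono hm
          rw [f1, e1, List.append_assoc] at this
          exact this
        · have := f5 st' hst' ns hns hvb
          rw [e1, List.append_assoc] at this
          exact this

lemma pvMem_allStates (runway : List Bool) (p q : Int) :
    (p, q) ∈ pvAllStates runway ↔ 0 ≤ p ∧ p < PySem.List.len runway ∧
      -PySem.List.len runway ≤ q ∧ q < PySem.List.len runway + 1 := by
  simp only [pvAllStates, List.mem_flatMap, List.mem_map, PySem.List.mem_pyRange_one,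
    Prod.mk.injEq]
  constructor
  · rintro ⟨p', ⟨h1, h2⟩, q', ⟨h3, h4⟩, rfl, rfl⟩
    exact ⟨h1, h2, h3, h4⟩
  · rintro ⟨h1, h2, h3, h4⟩
    exact ⟨p, ⟨h1, h2⟩, q, ⟨h3, h4⟩, rfl, rfl⟩

lemma pvInv_step (runway : List Bool) (U frontier : List (Int × Int))
    (seen : PySem.Set (Int × Int)) (h : pvInv runway U frontier seen) :
    pvInv runway U (pvExpand runway frontier seen).2 (pvExpand runway frontier seen).1 := by
  obtain ⟨hU, hnd, hsub, hval, hfs⟩ := h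
  obtain ⟨l, e1, e2, e3, e4, e5⟩ := pvExpand_master runway frontier (seen, [])
  have he1 : (pvExpand runway frontier seen).1 = seen ++ l := e1
  have he2 : (pvExpand runway frontier seen).2 = l := by
    have := e2
    simpa using this
  have hvalid_l : ∀ x ∈ l, pvValidP runway x.1 := by
    intro x hx
    obtain ⟨st, hst, ns, hns, rfl, hvb⟩ := e3 x hx
    exact (pvValidB_iff runway _).mp hvb
  refine ⟨hU, ?_, ?_, ?_, ?_⟩
  · rw [he1]
    exact e4 hnd
  · intro x hx
    rw [he1] at hx
    rcases List.mem_append.mp hx with hx | hx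
    · exact hsub x hx
    · obtain ⟨st, hst, ns, hns, rfl, hvb⟩ := e3 x hx
      have hv := (pvValidB_iff runway _).mp hvb
      have hpv := hval st hst
      refine hU _ hv ?_ ?_
      · have := hv.1
        have := hv.2.1
        have := hpv.1
        have := hpv.2.1
        simp only
        omega
      · have := hv.1
        have := hv.2.1
        have := hpv.1
        have := hpv.2.1
        simp only
        omega
  · intro st hst
    rw [he2] at hst
    exact hvalid_l st hst
  · intro st hst
    rw [he2] at hst
    rw [he1]
    exact List.mem_append_right _ hst

lemma pvDecrease (runway : List Bool) (U frontier : List (Int × Int))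
    (seen : PySem.Set (Int × Int)) (h : pvInv runway U frontier seen)
    (hf : frontier ≠ []) :
    (U.length + 1 - (pvExpand runway frontier seen).1.length) * 4 +
        (pvExpand runway frontier seen).2.length <
      (U.length + 1 - seen.length) * 4 + frontier.length := by
  obtain ⟨_, hnd', hsub', _, _⟩ := pvInv_step runway U frontier seen h
  obtain ⟨l, e1, e2, e3, e4, e5⟩ := pvExpand_master runway frontier (seen, [])
  have he1 : (pvExpand runway frontier seen).1 = seen ++ l := e1
  have he2 : (pvExpand runway frontier seen).2 = l := by simpa using e2
  have hlen : (pvExpand runway frontier seen).1.length ≤ U.length :=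
    (hnd'.subperm (fun x hx => hsub' x hx)).length_le
  have hfl : 0 < frontier.length := List.length_pos_of_ne_nil hf
  rw [he1] at hlen ⊢
  rw [he2]
  rw [List.length_append] at hlen ⊢
  omega

-- Source B's while loop (U and the pvInv argument are proof-only scaffolding)
def pvLoop (runway : List Bool) (U frontier : List (Int × Int))
    (seen : PySem.Set (Int × Int)) (h : pvInv runway U frontier seen) : Bool :=
  if hf : frontier = [] then false
  else if frontier.any (fun st => st.2 == 0) then true
  else pvLoop runway U (pvExpand runway frontier seen).2 (pvExpand runway frontier seen).1
    (pvInv_step runway U frontier seen h)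
termination_by (U.length + 1 - seen.length) * 4 + frontier.length
decreasing_by exact pvDecrease runway U frontier seen h hf

lemma pvInv_init (runway : List Bool) (speed pos : Int)
    (hg : pvValidB runway pos = true) :
    pvInv runway ((pos, speed) :: pvAllStates runway) [(pos, speed)] [(pos, speed)] := by
  have hv := (pvValidB_iff runway pos).mp hg
  refine ⟨?_, by simp, by simp, by simpa using hv, by simp⟩
  intro st hst hlo hhi
  right
  cases st with
  | mk p q =>
    refine (pvMem_allStates runway p q).mpr ⟨hst.1, hst.2.1, hlo, by omega⟩

def can_stop_first_pass_alt (runway : List Bool) (speed : Int) (pos : Int) : Bool :=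
  if hg : pvValidB runway pos = true then
    pvLoop runway ((pos, speed) :: pvAllStates runway) [(pos, speed)] [(pos, speed)]
      (pvInv_init runway speed pos hg)
  else false

-- ===== PRECONDITION & SPEC =====
def Spec_can_stop_first_pass (runway : List Bool) (speed : Int) (pos : Int) (out : Bool) : Prop := out = can_stop_first_pass_alt runway speed pos
instance (runway : List Bool) (speed : Int) (pos : Int) (out : Bool) : Decidable (Spec_can_stop_first_pass runway speed pos out) := by unfold Spec_can_stop_first_pass; infer_instance

-- ===== CLAIM (what is proved, stated in full; the proofs are below) =====
def Claim_equal_can_stop_first_pass : Prop := ∀ (runway : List Bool) (speed : Int) (pos : Int), Dom_can_stop_first_pass runway speed pos → Spec_can_stop_first_pass runway speed pos (can_stop_first_pass runway speed pos)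

-- ===== LEMMAS AND PROOFS =====

-- 'a stop is reachable from state (speed, pos)' — the common semantics of A and B
inductive pvGood (runway : List Bool) : Int → Int → Prop
  | zero (pos : Int) : pvValidP runway pos → pvGood runway 0 pos
  | step (speed pos ns : Int) : pvValidP runway pos →
      (ns = speed - 1 ∨ ns = speed ∨ ns = speed + 1) →
      pvGood runway ns (pos + ns) → pvGood runway speed pos

lemma pvGood_valid {runway : List Bool} {s p : Int} (h : pvGood runway s p) :
    pvValidP runway p := by cases h <;> assumption


lemma pvA_good (runway : List Bool) (speed pos : Int) :
    can_stop_first_pass runway speed pos = true → pvGood runway speed pos := by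
  fun_induction can_stop_first_pass runway speed pos with
  | case1 speed pos h => simp
  | case2 speed pos h h2 =>
      intro _
      exact h2.1 ▸ pvGood.zero pos h2.2
  | case3 speed pos h h2 ih3 ih2 ih1 =>
      intro hor
      have hv : pvValidP runway pos := not_not.mp h
      rcases Bool.or_eq_true_iff.mp hor with hor' | hc
      · rcases Bool.or_eq_true_iff.mp hor' with hc | hc
        · refine pvGood.step speed pos (speed - 1) hv (Or.inl rfl) ?_
          have he : pos + (speed - 1) = pos + speed - 1 := by ring
          rw [he]; exact ih3 hc
        · refine pvGood.step speed pos speed hv (Or.inr (Or.inl rfl)) (ih2 hc)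
      · refine pvGood.step speed pos (speed + 1) hv (Or.inr (Or.inr rfl)) ?_
        have he : pos + (speed + 1) = pos + speed + 1 := by ring
        rw [he]; exact ih1 hc

lemma pvGood_A (runway : List Bool) (speed pos : Int) (h : pvGood runway speed pos) :
    can_stop_first_pass runway speed pos = true := by
  induction h with
  | zero p hv =>
      rw [can_stop_first_pass]
      simp [pvValidP] at hv
      simp [hv]
  | step s p ns hv hns hg ih =>
      rw [can_stop_first_pass]
      simp only [pvValidP] at hv
      by_cases hs : s = 0
      · have hlt := hv.2.1
        simp only [PySem.List.len_eq] at hlt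
        simp [hv, hs, hlt]
      · simp only [hv, not_true, and_true, not_false_iff, dif_neg]
        rw [dif_neg hs]
        rcases hns with h1 | h1 | h1
        · have : p + s - 1 = p + ns := by omega
          rw [this, ← h1]; simp [ih]
        · have : p + s = p + ns := by omega
          rw [this, ← h1]; simp [ih]
        · have : p + s + 1 = p + ns := by omega
          rw [this, ← h1]; simp [ih]

lemma pvA_iff_good (runway : List Bool) (speed pos : Int) :
    can_stop_first_pass runway speed pos = true ↔ pvGood runway speed pos :=
  ⟨pvA_good runway speed pos, pvGood_A runway speed pos⟩


-- (B-side lemmas)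

lemma pvLoop_eq (runway : List Bool) (U frontier : List (Int × Int))
    (seen : PySem.Set (Int × Int)) (h : pvInv runway U frontier seen) :
    pvLoop runway U frontier seen h =
      if frontier = [] then false
      else if frontier.any (fun st => st.2 == 0) then true
      else pvLoop runway U (pvExpand runway frontier seen).2 (pvExpand runway frontier seen).1
        (pvInv_step runway U frontier seen h) := by
  rw [pvLoop]
  by_cases hf : frontier = [] <;> simp [hf]

lemma pvLoop_sound (runway : List Bool) (s0 p0 : Int) :
    ∀ (N : Nat) (U frontier : List (Int × Int)) (seen : PySem.Set (Int × Int))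
      (h : pvInv runway U frontier seen),
      (U.length + 1 - seen.length) * 4 + frontier.length ≤ N →
      (∀ st ∈ frontier, pvGood runway st.2 st.1 → pvGood runway s0 p0) →
      pvLoop runway U frontier seen h = true → pvGood runway s0 p0 := by
  intro N
  induction N with
  | zero =>
      intro U frontier seen h hN Hr htrue
      have hf : frontier = [] := List.length_eq_zero_iff.mp (by omega)
      rw [pvLoop_eq, if_pos hf] at htrue
      exact absurd htrue (by simp)
  | succ N ih =>
      intro U frontier seen h hN Hr htrue
      rw [pvLoop_eq] at htrue
      by_cases hf : frontier = []
      · rw [if_pos hf] at htrue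
        exact absurd htrue (by simp)
      · rw [if_neg hf] at htrue
        by_cases hz : frontier.any (fun st => st.2 == 0) = true
        · obtain ⟨st, hst, hz0⟩ := List.any_eq_true.mp hz
          have hz0' : st.2 = 0 := by simpa using hz0
          have hv := h.2.2.2.1 st hst
          refine Hr st hst ?_
          rw [hz0']
          exact pvGood.zero st.1 hv
        · rw [if_neg hz] at htrue
          refine ih U _ _ (pvInv_step runway U frontier seen h) ?_ ?_ htrue
          · have := pvDecrease runway U frontier seen h hf
            omega
          · intro st' hst' hg'
            obtain ⟨l, e1, e2, e3, e4, e5⟩ := pvExpand_master runway frontier (seen, [])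
            have he2 : (pvExpand runway frontier seen).2 = l := by simpa using e2
            rw [he2] at hst'
            obtain ⟨st, hst, ns, hns, heq, hvb⟩ := e3 st' hst'
            have hvp := h.2.2.2.1 st hst
            refine Hr st hst ?_
            refine pvGood.step st.2 st.1 ns hvp hns ?_
            rw [heq] at hg'
            exact hg'

-- a set of states closed under moves and containing no stop
def pvClosed (runway : List Bool) (T : List (Int × Int)) : Prop :=
  ∀ x ∈ T, ¬ x.2 = 0 ∧ ∀ ns, (ns = x.2 - 1 ∨ ns = x.2 ∨ ns = x.2 + 1) →
    pvValidP runway (x.1 + ns) → (x.1 + ns, ns) ∈ T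

lemma pvLoop_false (runway : List Bool) :
    ∀ (N : Nat) (U frontier : List (Int × Int)) (seen : PySem.Set (Int × Int))
      (h : pvInv runway U frontier seen),
      (U.length + 1 - seen.length) * 4 + frontier.length ≤ N →
      (∀ x ∈ seen, x ∈ frontier ∨ (¬ x.2 = 0 ∧ ∀ ns,
        (ns = x.2 - 1 ∨ ns = x.2 ∨ ns = x.2 + 1) →
        pvValidP runway (x.1 + ns) → (x.1 + ns, ns) ∈ seen)) →
      pvLoop runway U frontier seen h = false →
      ∃ T, (∀ x ∈ seen, x ∈ T) ∧ pvClosed runway T := by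
  intro N
  induction N with
  | zero =>
      intro U frontier seen h hN H2 _
      have hf : frontier = [] := List.length_eq_zero_iff.mp (by omega)
      subst hf
      refine ⟨seen, fun x hx => hx, ?_⟩
      intro x hx
      rcases H2 x hx with hc | hc
      · exact absurd hc (by simp)
      · exact hc
  | succ N ih =>
      intro U frontier seen h hN H2 hfalse
      rw [pvLoop_eq] at hfalse
      by_cases hf : frontier = []
      · subst hf
        refine ⟨seen, fun x hx => hx, ?_⟩
        intro x hx
        rcases H2 x hx with hc | hc
        · exact absurd hc (by simp)
        · exact hc
      · rw [if_neg hf] at hfalse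
        by_cases hz : frontier.any (fun st => st.2 == 0) = true
        · rw [if_pos hz] at hfalse
          exact absurd hfalse (by simp)
        · rw [if_neg hz] at hfalse
          have hz' : ∀ st ∈ frontier, ¬ st.2 = 0 := by
            intro st hst hc
            exact hz (List.any_eq_true.mpr ⟨st, hst, by simpa using hc⟩)
          obtain ⟨l, e1, e2, e3, e4, e5⟩ := pvExpand_master runway frontier (seen, [])
          have he1 : (pvExpand runway frontier seen).1 = seen ++ l := e1
          have he2 : (pvExpand runway frontier seen).2 = l := by simpa using e2
          have H2' : ∀ x ∈ (pvExpand runway frontier seen).1,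
              x ∈ (pvExpand runway frontier seen).2 ∨ (¬ x.2 = 0 ∧ ∀ ns,
                (ns = x.2 - 1 ∨ ns = x.2 ∨ ns = x.2 + 1) →
                pvValidP runway (x.1 + ns) →
                (x.1 + ns, ns) ∈ (pvExpand runway frontier seen).1) := by
            intro x hx
            rw [he1] at hx
            rcases List.mem_append.mp hx with hx | hx
            · rcases H2 x hx with hxf | ⟨hx0, hcl2⟩
              · right
                refine ⟨hz' x hxf, ?_⟩
                intro ns hns hvns
                have := e5 x hxf ns hns ((pvValidB_iff runway _).mpr hvns)
                rw [he1]
                exact this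
              · right
                refine ⟨hx0, ?_⟩
                intro ns hns hvns
                rw [he1]
                exact List.mem_append_left _ (hcl2 ns hns hvns)
            · left
              rw [he2]
              exact hx
          obtain ⟨T, hT1, hcl⟩ := ih U _ _ (pvInv_step runway U frontier seen h)
            (by have := pvDecrease runway U frontier seen h hf; omega) H2' hfalse
          refine ⟨T, ?_, hcl⟩
          intro x hx
          refine hT1 x ?_
          rw [he1]
          exact List.mem_append_left _ hx

lemma pvClosed_not_good (runway : List Bool) (T : List (Int × Int))
    (hcl : pvClosed runway T) :
    ∀ (s p : Int), pvGood runway s p → (p, s) ∈ T → False := by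
  intro s p hg
  induction hg with
  | zero q hv =>
      intro hm
      exact (hcl _ hm).1 rfl
  | step s' q ns hv hns hchild ih =>
      intro hm
      exact ih ((hcl _ hm).2 ns hns (pvGood_valid hchild))

lemma pvB_iff_good (runway : List Bool) (speed pos : Int)
    (hg : pvValidB runway pos = true) :
    (can_stop_first_pass_alt runway speed pos = true ↔ pvGood runway speed pos) := by
  unfold can_stop_first_pass_alt
  rw [dif_pos hg]
  constructor
  · refine pvLoop_sound runway speed pos _ _ _ _ (pvInv_init runway speed pos hg)
      (le_refl _) ?_
    intro st hst hgd
    simp only [List.mem_singleton] at hst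
    subst hst
    exact hgd
  · intro hgood
    by_contra hB
    have hfalse : pvLoop runway ((pos, speed) :: pvAllStates runway) [(pos, speed)]
        [(pos, speed)] (pvInv_init runway speed pos hg) = false := by
      revert hB
      cases pvLoop runway ((pos, speed) :: pvAllStates runway) [(pos, speed)]
        [(pos, speed)] (pvInv_init runway speed pos hg) <;> simp
    obtain ⟨T, hT1, hcl⟩ := pvLoop_false runway _ _ _ _ (pvInv_init runway speed pos hg)
      (le_refl _) (fun x hx => Or.inl hx) hfalse
    exact pvClosed_not_good runway T hcl speed pos hgood (hT1 _ (by simp))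

-- ===== VERDICT (by name: the statement is the Claim_ definition above) =====
theorem can_stop_first_pass_spec : Claim_equal_can_stop_first_pass := by
  unfold Claim_equal_can_stop_first_pass Spec_can_stop_first_pass
  intro runway speed pos _
  by_cases hg : pvValidB runway pos = true
  · exact Bool.eq_iff_iff.mpr
      ((pvA_iff_good runway speed pos).trans (pvB_iff_good runway speed pos hg).symm)
  · have hv : ¬ pvValidP runway pos := fun hv => hg ((pvValidB_iff runway pos).mpr hv)
    rw [can_stop_first_pass, dif_pos (show ¬(0 ≤ pos ∧ pos < PySem.List.len runway ∧
      PySem.List.pyGetD runway pos false = true) from hv)]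
    unfold can_stop_first_pass_alt
    rw [dif_neg hg]
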